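-- pv_equiv track=rewrite | github.com/athulrajk/Data_Structures_and_Algorithms | Python/Maze Traversal.py | create_maze
-- ===== SOURCE A (Python) =====
-- def create_maze(B,N,M):
--     #initialize a 2d array with 0
--     maze=[[0 for i in range(M)] for j in range(N)]
--     #initialize start point as (0,0)
--     start_pt=(0,0)
--     #iterate through the B list
--     for i in range(N):
--         #iterate through the string B[i]
--         for j in range(M):
--             #start point
--             if B[i][j]=='A':
--                 start_pt=(i,j)
--             #obstacle
--             if B[i][j]=='X':
--                 #mark tile as 1 (cannot be traversed)
--                 maze[i][j]=1
--             #stranger looking >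
--             if B[i][j]=='>':
--                 #mark tile as 1
--                 maze[i][j]=1
--                 #mark all tiles to the right as 1(cannot be traversed)
--                 #till any obtacle or stranger is seen
--                 for k in range(j+1,M):
--                     maze[i][k]=1
--                     if B[i][k]!='.':
--                         break
--             #similarly do for all directions
--             if B[i][j]=='<':
--                 maze[i][j]=1
--                 for k in range(j-1,-1,-1):
--                     maze[i][k]=1
--                     if B[i][k]!='.':
--                         break
--             if B[i][j]=='^':
--                 maze[i][j]=1
--                 for k in range(i-1,-1,-1):
--                     maze[k][j]=1
--                     if B[k][j]!='.':
--                         break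
--             if B[i][j]=='v':
--                 maze[i][j]=1
--                 for k in range(i+1,N):
--                     maze[k][j]=1
--                     if B[k][j]!='.':
--                         break
--     #mark start point and end point as 0
--     #can be traversed
--     x,y=start_pt
--     maze[x][y]=maze[N-1][M-1]=0
--     #return maze,start_pt
--     return maze,start_pt
-- ===== SOURCE B (Python) =====
-- def create_maze(B, N, M):
--     # Pull-based rewrite: each cell decides for itself whether it is blocked, by
--     # looking at the nearest non-'.' symbol in each of the four directions.
--     def cell(i, j):
--         if B[i][j] in 'X><^v':
--             return 1
--         left = next((B[i][k] for k in range(j - 1, -1, -1) if B[i][k] != '.'), None)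
--         if left == '>':
--             return 1
--         right = next((B[i][k] for k in range(j + 1, M) if B[i][k] != '.'), None)
--         if right == '<':
--             return 1
--         up = next((B[k][j] for k in range(i - 1, -1, -1) if B[k][j] != '.'), None)
--         if up == 'v':
--             return 1
--         down = next((B[k][j] for k in range(i + 1, N) if B[k][j] != '.'), None)
--         if down == '^':
--             return 1
--         return 0
--     start_pt = (0, 0)
--     for i in range(N):
--         for j in range(M):
--             if B[i][j] == 'A':
--                 start_pt = (i, j)
--     maze = [[cell(i, j) for j in range(M)] for i in range(N)]
--     maze[start_pt[0]][start_pt[1]] = 0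
--     maze[N - 1][M - 1] = 0
--     return maze, start_pt
-- ===== Notes on version B (the rewrite author's own statement) =====
-- stated objective: alternative
-- what changed: A pushes: for each stranger it mutates the grid along a ray with an inner break-scan; B pulls: it builds the grid as a comprehension in which each cell independently checks whether its own symbol blocks or the nearest non-'.' symbol in each of the four directions is a stranger facing it, then zeroes the start and the corner.
import Mathlib
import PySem

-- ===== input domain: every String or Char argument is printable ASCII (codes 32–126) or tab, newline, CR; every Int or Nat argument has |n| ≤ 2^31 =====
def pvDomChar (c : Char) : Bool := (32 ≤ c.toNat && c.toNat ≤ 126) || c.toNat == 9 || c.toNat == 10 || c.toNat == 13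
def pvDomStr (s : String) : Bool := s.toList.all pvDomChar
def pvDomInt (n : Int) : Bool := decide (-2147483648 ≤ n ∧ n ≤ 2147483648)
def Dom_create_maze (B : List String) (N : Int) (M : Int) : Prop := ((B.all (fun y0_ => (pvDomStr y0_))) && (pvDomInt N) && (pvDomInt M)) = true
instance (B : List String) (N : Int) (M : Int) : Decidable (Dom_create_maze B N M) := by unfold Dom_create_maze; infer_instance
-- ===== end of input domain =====

-- B re-implements the marking pull-wise (each cell inspects the nearest non-'.' symbol in the
-- four directions) instead of A's push-wise per-stranger ray marking; same results, no speed claim.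

-- ===== PORT A =====
-- B[i][j] under Pre_ is always in range (all loop indices are ≥ 0); the default is never reached there.
def pvGetc (Bs : List (List Char)) (i j : Int) : Char :=
  PySem.List.pyGetD (PySem.List.pyGetD Bs i []) j ' '

-- maze[i][j] = v (in range under Pre_)
def pvSet2 (maze : List (List Int)) (i j : Int) (v : Int) : List (List Int) :=
  PySem.List.pySetD maze i (PySem.List.pySetD (PySem.List.pyGetD maze i []) j v)

-- 'for k in ks: maze[i][k]=1; if B[i][k]!='.': break'
def pvRayRow (Bs : List (List Char)) (i : Int) (ks : List Int) (maze : List (List Int)) : List (List Int) :=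
  match ks with
  | [] => maze
  | k :: rest =>
    let maze' := pvSet2 maze i k 1
    if pvGetc Bs i k ≠ '.' then maze' else pvRayRow Bs i rest maze'

-- 'for k in ks: maze[k][j]=1; if B[k][j]!='.': break'
def pvRayCol (Bs : List (List Char)) (j : Int) (ks : List Int) (maze : List (List Int)) : List (List Int) :=
  match ks with
  | [] => maze
  | k :: rest =>
    let maze' := pvSet2 maze k j 1
    if pvGetc Bs k j ≠ '.' then maze' else pvRayCol Bs j rest maze'

-- the maze updates of one body iteration of A's double loop
def pvStepA (Bs : List (List Char)) (N M : Int) (i j : Int) (maze : List (List Int)) : List (List Int) :=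
  let c := pvGetc Bs i j
  let maze := if c = 'X' then pvSet2 maze i j 1 else maze
  let maze := if c = '>' then pvRayRow Bs i (PySem.List.pyRange (j+1) M 1) (pvSet2 maze i j 1) else maze
  let maze := if c = '<' then pvRayRow Bs i (PySem.List.pyRange (j-1) (-1) (-1)) (pvSet2 maze i j 1) else maze
  let maze := if c = '^' then pvRayCol Bs j (PySem.List.pyRange (i-1) (-1) (-1)) (pvSet2 maze i j 1) else maze
  let maze := if c = 'v' then pvRayCol Bs j (PySem.List.pyRange (i+1) N 1) (pvSet2 maze i j 1) else maze
  maze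

def create_maze (B : List String) (N : Int) (M : Int) : List (List Int) × (Int × Int) :=
  let Bs := B.map String.toList
  let maze0 := (PySem.List.pyRange 0 N 1).map (fun _ => (PySem.List.pyRange 0 M 1).map (fun _ => (0 : Int)))
  let st := (PySem.List.pyRange 0 N 1).foldl (fun st i =>
      (PySem.List.pyRange 0 M 1).foldl (fun st j =>
        (pvStepA Bs N M i j st.1, if pvGetc Bs i j = 'A' then (i, j) else st.2)) st)
    (maze0, ((0 : Int), (0 : Int)))
  let maze := pvSet2 st.1 st.2.1 st.2.2 0
  let maze := pvSet2 maze (N - 1) (M - 1) 0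
  (maze, st.2)

-- ===== PORT B =====
-- one cell of B's pull-based grid: 1 iff own symbol blocks, or the nearest non-'.' symbol in
-- some direction is a stranger looking at this cell ('next(...)' is List.find?)
def pvCellB (Bs : List (List Char)) (N M : Int) (i j : Int) : Int :=
  let c := pvGetc Bs i j
  if c = 'X' ∨ c = '>' ∨ c = '<' ∨ c = '^' ∨ c = 'v' then 1
  else if ((PySem.List.pyRange (j-1) (-1) (-1)).map (fun k => pvGetc Bs i k)).find? (· != '.') = some '>' then 1
  else if ((PySem.List.pyRange (j+1) M 1).map (fun k => pvGetc Bs i k)).find? (· != '.') = some '<' then 1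
  else if ((PySem.List.pyRange (i-1) (-1) (-1)).map (fun k => pvGetc Bs k j)).find? (· != '.') = some 'v' then 1
  else if ((PySem.List.pyRange (i+1) N 1).map (fun k => pvGetc Bs k j)).find? (· != '.') = some '^' then 1
  else 0

def create_maze_alt (B : List String) (N : Int) (M : Int) : List (List Int) × (Int × Int) :=
  let Bs := B.map String.toList
  let start := (PySem.List.pyRange 0 N 1).foldl (fun st i =>
      (PySem.List.pyRange 0 M 1).foldl (fun st j =>
        if pvGetc Bs i j = 'A' then (i, j) else st) st) ((0 : Int), (0 : Int))
  let maze := (PySem.List.pyRange 0 N 1).map (fun i => (PySem.List.pyRange 0 M 1).map (fun j => pvCellB Bs N M i j))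
  let maze := pvSet2 maze start.1 start.2 0
  let maze := pvSet2 maze (N - 1) (M - 1) 0
  (maze, start)

-- ===== PRECONDITION & SPEC =====
-- Pre_ = exactly the inputs where Python A returns normally: at least one row and one column is
-- used (else maze[N-1][M-1] / maze[x][y] raises IndexError), N rows exist, and each of the first
-- N rows has at least M characters (else B[i][j] raises IndexError).
def Pre_create_maze (B : List String) (N : Int) (M : Int) : Prop :=
  1 ≤ N ∧ N ≤ (B.length : Int) ∧ 1 ≤ M ∧ ∀ s ∈ B.take N.toNat, M ≤ (s.toList.length : Int)
instance (B : List String) (N : Int) (M : Int) : Decidable (Pre_create_maze B N M) := by unfold Pre_create_maze; infer_instance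
def pvWitness_create_maze : List String × Int × Int := (["A.X", ">.."], 2, 3)

def Spec_create_maze (B : List String) (N : Int) (M : Int) (out : List (List Int) × (Int × Int)) : Prop := out = create_maze_alt B N M
instance (B : List String) (N : Int) (M : Int) (out : List (List Int) × (Int × Int)) : Decidable (Spec_create_maze B N M out) := by unfold Spec_create_maze; infer_instance

-- ===== CLAIM (what is proved, stated in full; the proofs are below) =====
def Claim_equal_create_maze : Prop := ∀ (B : List String) (N : Int) (M : Int), Dom_create_maze B N M → Pre_create_maze B N M → Spec_create_maze B N M (create_maze B N M)

-- ===== LEMMAS AND PROOFS =====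

-- grid of values of a function on [0,N) × [0,M)
def pvGridOf (N M : Int) (f : Int → Int → Int) : List (List Int) :=
  (PySem.List.pyRange 0 N 1).map (fun i => (PySem.List.pyRange 0 M 1).map (fun j => f i j))

-- prefix of ks through (and including) the first k with p k
def pvTakeThru (p : Int → Bool) : List Int → List Int
  | [] => []
  | k :: rest => if p k then [k] else k :: pvTakeThru p rest

-- the set of cells one body iteration of A writes (all with value 1)
def pvWrites (Bs : List (List Char)) (N M i j r c : Int) : Bool :=
  let c0 := pvGetc Bs i j
  (r == i && c == j && (c0 == 'X' || c0 == '>' || c0 == '<' || c0 == '^' || c0 == 'v'))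
  || (c0 == '>' && r == i && (pvTakeThru (fun k => pvGetc Bs i k != '.') (PySem.List.pyRange (j+1) M 1)).contains c)
  || (c0 == '<' && r == i && (pvTakeThru (fun k => pvGetc Bs i k != '.') (PySem.List.pyRange (j-1) (-1) (-1))).contains c)
  || (c0 == '^' && c == j && (pvTakeThru (fun k => pvGetc Bs k j != '.') (PySem.List.pyRange (i-1) (-1) (-1))).contains r)
  || (c0 == 'v' && c == j && (pvTakeThru (fun k => pvGetc Bs k j != '.') (PySem.List.pyRange (i+1) N 1)).contains r)

def pvPairs (N M : Int) : List (Int × Int) :=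
  (PySem.List.pyRange 0 N 1).flatMap (fun i => (PySem.List.pyRange 0 M 1).map (fun j => (i, j)))

def pvAnyWrites (Bs : List (List Char)) (N M r c : Int) : Bool :=
  (pvPairs N M).any (fun p => pvWrites Bs N M p.1 p.2 r c)

lemma pvGridOf_congr {N M : Int} {f g : Int → Int → Int}
    (h : ∀ r c, 0 ≤ r → r < N → 0 ≤ c → c < M → f r c = g r c) :
    pvGridOf N M f = pvGridOf N M g := by
  apply List.map_congr_left
  intro r hr
  apply List.map_congr_left
  intro c hc
  rw [PySem.List.mem_pyRange_one] at hr hc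
  exact h r c hr.1 hr.2 hc.1 hc.2

lemma pvSet_map_pyRange {α : Type} (g : Int → α) (n k : Int) (x : α) (h0 : 0 ≤ k) :
    ((PySem.List.pyRange 0 n 1).map g).set k.toNat x
      = (PySem.List.pyRange 0 n 1).map (fun t => if t = k then x else g t) := by
  apply List.ext_getElem
  · simp [PySem.List.length_pyRange_one]
  · intro m h1 h2
    simp only [List.getElem_set, List.getElem_map, PySem.List.getElem_pyRange_one]
    by_cases hm : k.toNat = m
    · rw [if_pos hm, if_pos (by omega)]
    · rw [if_neg hm, if_neg (by omega)]

lemma pvSet2_gridOf {N M : Int} (f : Int → Int → Int) {i j : Int} (v : Int)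
    (hi0 : 0 ≤ i) (hiN : i < N) (hj0 : 0 ≤ j) (hjM : j < M) :
    pvSet2 (pvGridOf N M f) i j v
      = pvGridOf N M (fun r c => if r = i ∧ c = j then v else f r c) := by
  unfold pvSet2 pvGridOf
  rw [PySem.List.pyGetD_map_pyRange_of_nonneg _ _ _ _ hi0 hiN]
  rw [PySem.List.pySetD_of_nonneg (h := hj0), PySem.List.pySetD_of_nonneg (h := hi0)]
  rw [pvSet_map_pyRange _ _ _ _ hj0, pvSet_map_pyRange _ _ _ _ hi0]
  apply List.map_congr_left
  intro r hr
  by_cases hri : r = i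
  · subst hri
    rw [if_pos rfl]
    apply List.map_congr_left
    intro c hc
    by_cases hcj : c = j
    · simp [hcj]
    · simp [hcj]
  · rw [if_neg hri]
    apply List.map_congr_left
    intro c hc
    simp [hri]

lemma pvRayRow_gridOf {N M : Int} (Bs : List (List Char)) {i : Int} (ks : List Int)
    (f : Int → Int → Int) (hi0 : 0 ≤ i) (hiN : i < N)
    (hks : ∀ k ∈ ks, 0 ≤ k ∧ k < M) :
    pvRayRow Bs i ks (pvGridOf N M f)
      = pvGridOf N M (fun r c =>
          if r = i ∧ (pvTakeThru (fun k => pvGetc Bs i k != '.') ks).contains c then 1 else f r c) := by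
  induction ks generalizing f with
  | nil =>
    simp only [pvRayRow, pvTakeThru]
    apply pvGridOf_congr
    intro r c _ _ _ _
    simp
  | cons k rest ih =>
    obtain ⟨hk0, hkM⟩ := hks k (List.mem_cons_self)
    simp only [pvRayRow]
    rw [pvSet2_gridOf f 1 hi0 hiN hk0 hkM]
    by_cases hd : pvGetc Bs i k = '.'
    · rw [if_neg (by simpa using hd)]
      rw [ih _ (fun x hx => hks x (List.mem_cons_of_mem _ hx))]
      apply pvGridOf_congr
      intro r c _ _ _ _
      have hp : ((fun k => pvGetc Bs i k != '.') k) = false := by simp [hd]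
      simp only [pvTakeThru, hp, Bool.false_eq_true, if_false, List.contains_cons]
      by_cases hr : r = i
      · subst hr
        by_cases hck : c = k
        · simp [hck]
        · simp [hck, Ne.symm hck]
      · simp [hr]
    · rw [if_pos (by simpa using hd)]
      apply pvGridOf_congr
      intro r c _ _ _ _
      have hp : ((fun k => pvGetc Bs i k != '.') k) = true := by simpa using hd
      simp only [pvTakeThru, hp, if_true, List.contains_cons, List.contains_nil]
      by_cases hr : r = i
      · subst hr
        by_cases hck : c = k
        · simp [hck]
        · simp [hck, Ne.symm hck]
      · simp [hr]

lemma pvRayCol_gridOf {N M : Int} (Bs : List (List Char)) {j : Int} (ks : List Int)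
    (f : Int → Int → Int) (hj0 : 0 ≤ j) (hjM : j < M)
    (hks : ∀ k ∈ ks, 0 ≤ k ∧ k < N) :
    pvRayCol Bs j ks (pvGridOf N M f)
      = pvGridOf N M (fun r c =>
          if c = j ∧ (pvTakeThru (fun k => pvGetc Bs k j != '.') ks).contains r then 1 else f r c) := by
  induction ks generalizing f with
  | nil =>
    simp only [pvRayCol, pvTakeThru]
    apply pvGridOf_congr
    intro r c _ _ _ _
    simp
  | cons k rest ih =>
    obtain ⟨hk0, hkM⟩ := hks k (List.mem_cons_self)
    simp only [pvRayCol]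
    rw [pvSet2_gridOf f 1 hk0 hkM hj0 hjM]
    by_cases hd : pvGetc Bs k j = '.'
    · rw [if_neg (by simpa using hd)]
      rw [ih _ (fun x hx => hks x (List.mem_cons_of_mem _ hx))]
      apply pvGridOf_congr
      intro r c _ _ _ _
      have hp : ((fun k => pvGetc Bs k j != '.') k) = false := by simp [hd]
      simp only [pvTakeThru, hp, Bool.false_eq_true, if_false, List.contains_cons]
      by_cases hr : c = j
      · subst hr
        by_cases hck : r = k
        · simp [hck]
        · simp [hck, Ne.symm hck]
      · simp [hr]
    · rw [if_pos (by simpa using hd)]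
      apply pvGridOf_congr
      intro r c _ _ _ _
      have hp : ((fun k => pvGetc Bs k j != '.') k) = true := by simpa using hd
      simp only [pvTakeThru, hp, if_true, List.contains_cons, List.contains_nil]
      by_cases hr : c = j
      · subst hr
        by_cases hck : r = k
        · simp [hck]
        · simp [hck, Ne.symm hck]
      · simp [hr]

lemma pvStepA_gridOf {N M : Int} (Bs : List (List Char)) {i j : Int} (f : Int → Int → Int)
    (hi0 : 0 ≤ i) (hiN : i < N) (hj0 : 0 ≤ j) (hjM : j < M) :
    pvStepA Bs N M i j (pvGridOf N M f)
      = pvGridOf N M (fun r c => if pvWrites Bs N M i j r c then 1 else f r c) := by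
  simp only [pvStepA, pvWrites]
  have hrow1 : ∀ k ∈ PySem.List.pyRange (j+1) M 1, 0 ≤ k ∧ k < M := by
    intro k hk; rw [PySem.List.mem_pyRange_one] at hk; omega
  have hrow2 : ∀ k ∈ PySem.List.pyRange (j-1) (-1) (-1), 0 ≤ k ∧ k < M := by
    intro k hk; rw [PySem.List.mem_pyRange_neg_one] at hk; omega
  have hcol1 : ∀ k ∈ PySem.List.pyRange (i-1) (-1) (-1), 0 ≤ k ∧ k < N := by
    intro k hk; rw [PySem.List.mem_pyRange_neg_one] at hk; omega
  have hcol2 : ∀ k ∈ PySem.List.pyRange (i+1) N 1, 0 ≤ k ∧ k < N := by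
    intro k hk; rw [PySem.List.mem_pyRange_one] at hk; omega
  by_cases hX : pvGetc Bs i j = 'X'
  · simp only [hX, if_true, Char.reduceEq, if_false]
    rw [pvSet2_gridOf f 1 hi0 hiN hj0 hjM]
    apply pvGridOf_congr
    intro r c _ _ _ _
    simp only [hX, Char.reduceBEq, BEq.rfl]
    by_cases hr : r = i <;> by_cases hc : c = j <;> simp [hr, hc]
  · by_cases hR : pvGetc Bs i j = '>'
    · simp only [hX, hR, Char.reduceEq, if_true, if_false]
      rw [pvSet2_gridOf f 1 hi0 hiN hj0 hjM]
      rw [pvRayRow_gridOf Bs _ _ hi0 hiN hrow1]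
      apply pvGridOf_congr
      intro r c _ _ _ _
      simp only [hR, Char.reduceBEq, BEq.rfl]
      by_cases hr : r = i <;> by_cases hc : c = j <;>
        by_cases hctn : (pvTakeThru (fun k => pvGetc Bs i k != '.') (PySem.List.pyRange (j+1) M 1)).contains c <;>
        simp [hr, hc, hctn]
    · by_cases hL : pvGetc Bs i j = '<'
      · simp only [hX, hR, hL, Char.reduceEq, if_true, if_false]
        rw [pvSet2_gridOf f 1 hi0 hiN hj0 hjM]
        rw [pvRayRow_gridOf Bs _ _ hi0 hiN hrow2]
        apply pvGridOf_congr
        intro r c _ _ _ _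
        simp only [hL, Char.reduceBEq, BEq.rfl]
        by_cases hr : r = i <;> by_cases hc : c = j <;>
          by_cases hctn : (pvTakeThru (fun k => pvGetc Bs i k != '.') (PySem.List.pyRange (j-1) (-1) (-1))).contains c <;>
          simp [hr, hc, hctn]
      · by_cases hU : pvGetc Bs i j = '^'
        · simp only [hX, hR, hL, hU, Char.reduceEq, if_true, if_false]
          rw [pvSet2_gridOf f 1 hi0 hiN hj0 hjM]
          rw [pvRayCol_gridOf Bs _ _ hj0 hjM hcol1]
          apply pvGridOf_congr
          intro r c _ _ _ _
          simp only [hU, Char.reduceBEq, BEq.rfl]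
          by_cases hr : r = i <;> by_cases hc : c = j <;>
            by_cases hctn : (pvTakeThru (fun k => pvGetc Bs k j != '.') (PySem.List.pyRange (i-1) (-1) (-1))).contains r <;>
            simp [hr, hc, hctn]
        · by_cases hD : pvGetc Bs i j = 'v'
          · simp only [hX, hR, hL, hU, hD, Char.reduceEq, if_true, if_false]
            rw [pvSet2_gridOf f 1 hi0 hiN hj0 hjM]
            rw [pvRayCol_gridOf Bs _ _ hj0 hjM hcol2]
            apply pvGridOf_congr
            intro r c _ _ _ _
            simp only [hD, Char.reduceBEq, BEq.rfl]
            by_cases hr : r = i <;> by_cases hc : c = j <;>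
              by_cases hctn : (pvTakeThru (fun k => pvGetc Bs k j != '.') (PySem.List.pyRange (i+1) N 1)).contains r <;>
              simp [hr, hc, hctn]
          · simp only [hX, hR, hL, hU, hD, if_false]
            apply pvGridOf_congr
            intro r c _ _ _ _
            have b1 : (pvGetc Bs i j == 'X') = false := by simpa using hX
            have b2 : (pvGetc Bs i j == '>') = false := by simpa using hR
            have b3 : (pvGetc Bs i j == '<') = false := by simpa using hL
            have b4 : (pvGetc Bs i j == '^') = false := by simpa using hU
            have b5 : (pvGetc Bs i j == 'v') = false := by simpa using hD
            simp [b1, b2, b3, b4, b5]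

lemma pvFold_writes {N M : Int} (Bs : List (List Char)) (P : List (Int × Int))
    (hP : ∀ p ∈ P, 0 ≤ p.1 ∧ p.1 < N ∧ 0 ≤ p.2 ∧ p.2 < M) (f : Int → Int → Int) :
    P.foldl (fun mz p => pvStepA Bs N M p.1 p.2 mz) (pvGridOf N M f)
      = pvGridOf N M (fun r c => if P.any (fun p => pvWrites Bs N M p.1 p.2 r c) then 1 else f r c) := by
  induction P generalizing f with
  | nil =>
    simp only [List.foldl_nil, List.any_nil]
    exact pvGridOf_congr (fun r c _ _ _ _ => by simp)
  | cons p rest ih =>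
    obtain ⟨h1, h2, h3, h4⟩ := hP p List.mem_cons_self
    rw [List.foldl_cons, pvStepA_gridOf Bs f h1 h2 h3 h4,
      ih (fun q hq => hP q (List.mem_cons_of_mem _ hq))]
    apply pvGridOf_congr
    intro r c _ _ _ _
    by_cases hw : pvWrites Bs N M p.1 p.2 r c <;>
      by_cases ha : rest.any (fun q => pvWrites Bs N M q.1 q.2 r c) <;>
      simp [hw, ha]

lemma pvFoldl_flatMap {α β γ : Type} (l : List α) (g : α → List β) (f : γ → β → γ) (init : γ) :
    (l.flatMap g).foldl f init = l.foldl (fun st x => (g x).foldl f st) init := by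
  induction l generalizing init with
  | nil => rfl
  | cons x xs ih => simp [List.flatMap_cons, List.foldl_append, ih]

lemma pvFoldl_pair_split {α β ι : Type} (f : α → ι → α) (g : β → ι → β) (l : List ι) (ab : α × β) :
    l.foldl (fun st x => (f st.1 x, g st.2 x)) ab = (l.foldl f ab.1, l.foldl g ab.2) := by
  induction l generalizing ab with
  | nil => rfl
  | cons x xs ih => simp [List.foldl_cons, ih]

lemma pvMem_takeThru_asc (p : Int → Bool) (b : Int) : ∀ (n : Nat) (a c : Int), (b - a).toNat = n →
    (c ∈ pvTakeThru p (PySem.List.pyRange a b 1)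
      ↔ a ≤ c ∧ c < b ∧ ∀ m, a ≤ m → m < c → p m = false) := by
  intro n
  induction n with
  | zero =>
    intro a c h
    rw [PySem.List.pyRange_one_eq_nil (by omega)]
    simp only [pvTakeThru, List.not_mem_nil, false_iff]
    rintro ⟨h1, h2, h3⟩; omega
  | succ n ih =>
    intro a c h
    rw [PySem.List.pyRange_one_cons (by omega)]
    unfold pvTakeThru
    by_cases hpa : p a = true
    · rw [if_pos hpa]
      simp only [List.mem_singleton]
      constructor
      · rintro rfl; exact ⟨le_refl _, by omega, fun m h1 h2 => by omega⟩
      · rintro ⟨h1, h2, h3⟩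
        by_contra hne
        have : p a = false := h3 a (le_refl _) (by omega)
        simp [hpa] at this
    · rw [if_neg hpa]
      simp only [List.mem_cons]
      rw [ih (a+1) c (by omega)]
      constructor
      · rintro (rfl | ⟨h1, h2, h3⟩)
        · exact ⟨le_refl _, by omega, fun m h1 h2 => by omega⟩
        · refine ⟨by omega, h2, fun m hm1 hm2 => ?_⟩
          by_cases hma : m = a
          · subst hma; simpa using hpa
          · exact h3 m (by omega) hm2
      · rintro ⟨h1, h2, h3⟩
        by_cases hca : c = a
        · exact Or.inl hca
        · exact Or.inr ⟨by omega, h2, fun m hm1 hm2 => h3 m (by omega) hm2⟩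

lemma pvMem_takeThru_desc (p : Int → Bool) (b : Int) : ∀ (n : Nat) (a c : Int), (a - b).toNat = n →
    (c ∈ pvTakeThru p (PySem.List.pyRange a b (-1))
      ↔ b < c ∧ c ≤ a ∧ ∀ m, c < m → m ≤ a → p m = false) := by
  intro n
  induction n with
  | zero =>
    intro a c h
    rw [PySem.List.pyRange_neg_one_eq_nil (by omega)]
    simp only [pvTakeThru, List.not_mem_nil, false_iff]
    rintro ⟨h1, h2, h3⟩; omega
  | succ n ih =>
    intro a c h
    rw [PySem.List.pyRange_neg_one_cons (by omega)]
    unfold pvTakeThru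
    by_cases hpa : p a = true
    · rw [if_pos hpa]
      simp only [List.mem_singleton]
      constructor
      · rintro rfl; exact ⟨by omega, le_refl _, fun m h1 h2 => by omega⟩
      · rintro ⟨h1, h2, h3⟩
        by_contra hne
        have : p a = false := h3 a (by omega) (le_refl _)
        simp [hpa] at this
    · rw [if_neg hpa]
      simp only [List.mem_cons]
      rw [ih (a-1) c (by omega)]
      constructor
      · rintro (rfl | ⟨h1, h2, h3⟩)
        · exact ⟨by omega, le_refl _, fun m h1 h2 => by omega⟩
        · refine ⟨h1, by omega, fun m hm1 hm2 => ?_⟩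
          by_cases hma : m = a
          · subst hma; simpa using hpa
          · exact h3 m hm1 (by omega)
      · rintro ⟨h1, h2, h3⟩
        by_cases hca : c = a
        · exact Or.inl hca
        · exact Or.inr ⟨h1, by omega, fun m hm1 hm2 => h3 m hm1 (by omega)⟩

lemma pvFind_asc (q : Int → Bool) (b : Int) : ∀ (n : Nat) (a k : Int), (b - a).toNat = n →
    ((PySem.List.pyRange a b 1).find? q = some k
      ↔ a ≤ k ∧ k < b ∧ q k = true ∧ ∀ m, a ≤ m → m < k → q m = false) := by
  intro n
  induction n with
  | zero =>
    intro a k h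
    rw [PySem.List.pyRange_one_eq_nil (by omega)]
    simp only [List.find?_nil]
    constructor
    · intro hh; cases hh
    · rintro ⟨h1, h2, h3, h4⟩; omega
  | succ n ih =>
    intro a k h
    rw [PySem.List.pyRange_one_cons (by omega), List.find?_cons]
    by_cases hqa : q a = true
    · rw [hqa]
      simp only [Option.some.injEq]
      constructor
      · rintro rfl; exact ⟨le_refl _, by omega, hqa, fun m h1 h2 => by omega⟩
      · rintro ⟨h1, h2, h3, h4⟩
        by_contra hne
        have := h4 a (le_refl _) (by omega)
        simp [hqa] at this
    · rw [Bool.not_eq_true] at hqa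
      rw [hqa, ih (a+1) k (by omega)]
      constructor
      · rintro ⟨h1, h2, h3, h4⟩
        refine ⟨by omega, h2, h3, fun m hm1 hm2 => ?_⟩
        by_cases hma : m = a
        · subst hma; exact hqa
        · exact h4 m (by omega) hm2
      · rintro ⟨h1, h2, h3, h4⟩
        have hka : k ≠ a := fun hh => by rw [hh] at h3; rw [h3] at hqa; simp at hqa
        exact ⟨by omega, h2, h3, fun m hm1 hm2 => h4 m (by omega) hm2⟩

lemma pvFind_desc (q : Int → Bool) (b : Int) : ∀ (n : Nat) (a k : Int), (a - b).toNat = n →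
    ((PySem.List.pyRange a b (-1)).find? q = some k
      ↔ b < k ∧ k ≤ a ∧ q k = true ∧ ∀ m, k < m → m ≤ a → q m = false) := by
  intro n
  induction n with
  | zero =>
    intro a k h
    rw [PySem.List.pyRange_neg_one_eq_nil (by omega)]
    simp only [List.find?_nil]
    constructor
    · intro hh; cases hh
    · rintro ⟨h1, h2, h3, h4⟩; omega
  | succ n ih =>
    intro a k h
    rw [PySem.List.pyRange_neg_one_cons (by omega), List.find?_cons]
    by_cases hqa : q a = true
    · rw [hqa]
      simp only [Option.some.injEq]
      constructor
      · rintro rfl; exact ⟨by omega, le_refl _, hqa, fun m h1 h2 => by omega⟩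
      · rintro ⟨h1, h2, h3, h4⟩
        by_contra hne
        have := h4 a (by omega) (le_refl _)
        simp [hqa] at this
    · rw [Bool.not_eq_true] at hqa
      rw [hqa, ih (a-1) k (by omega)]
      constructor
      · rintro ⟨h1, h2, h3, h4⟩
        refine ⟨h1, by omega, h3, fun m hm1 hm2 => ?_⟩
        by_cases hma : m = a
        · subst hma; exact hqa
        · exact h4 m hm1 (by omega)
      · rintro ⟨h1, h2, h3, h4⟩
        have hka : k ≠ a := fun hh => by rw [hh] at h3; rw [h3] at hqa; simp at hqa
        exact ⟨h1, by omega, h3, fun m hm1 hm2 => h4 m hm1 (by omega)⟩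

lemma pvBridge_back (p : Int → Char) (M c : Int) (ch : Char) (hch : ch ≠ '.')
    (hc0 : 0 ≤ c) (hcM : c < M) :
    (∃ j, 0 ≤ j ∧ j < M ∧ p j = ch ∧
        c ∈ pvTakeThru (fun k => p k != '.') (PySem.List.pyRange (j+1) M 1))
      ↔ ((PySem.List.pyRange (c-1) (-1) (-1)).map p).find? (· != '.') = some ch := by
  rw [List.find?_map, Option.map_eq_some_iff]
  constructor
  · rintro ⟨j, hj0, hjM, hpj, hmem⟩
    rw [pvMem_takeThru_asc _ _ _ _ _ rfl] at hmem
    obtain ⟨h1, h2, h3⟩ := hmem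
    refine ⟨j, ?_, hpj⟩
    rw [pvFind_desc _ _ _ _ _ rfl]
    refine ⟨by omega, by omega, ?_, fun m hm1 hm2 => h3 m (by omega) (by omega)⟩
    show (p j != '.') = true
    rw [hpj]; simpa using hch
  · rintro ⟨k, hfind, hpk⟩
    rw [pvFind_desc _ _ _ _ _ rfl] at hfind
    obtain ⟨h1, h2, h3, h4⟩ := hfind
    refine ⟨k, by omega, by omega, hpk, ?_⟩
    rw [pvMem_takeThru_asc _ _ _ _ _ rfl]
    exact ⟨by omega, hcM, fun m hm1 hm2 => h4 m (by omega) (by omega)⟩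

lemma pvBridge_fwd (p : Int → Char) (M c : Int) (ch : Char) (hch : ch ≠ '.')
    (hc0 : 0 ≤ c) :
    (∃ j, 0 ≤ j ∧ j < M ∧ p j = ch ∧
        c ∈ pvTakeThru (fun k => p k != '.') (PySem.List.pyRange (j-1) (-1) (-1)))
      ↔ ((PySem.List.pyRange (c+1) M 1).map p).find? (· != '.') = some ch := by
  rw [List.find?_map, Option.map_eq_some_iff]
  constructor
  · rintro ⟨j, hj0, hjM, hpj, hmem⟩
    rw [pvMem_takeThru_desc _ _ _ _ _ rfl] at hmem
    obtain ⟨h1, h2, h3⟩ := hmem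
    refine ⟨j, ?_, hpj⟩
    rw [pvFind_asc _ _ _ _ _ rfl]
    refine ⟨by omega, hjM, ?_, fun m hm1 hm2 => h3 m (by omega) (by omega)⟩
    show (p j != '.') = true
    rw [hpj]; simpa using hch
  · rintro ⟨k, hfind, hpk⟩
    rw [pvFind_asc _ _ _ _ _ rfl] at hfind
    obtain ⟨h1, h2, h3, h4⟩ := hfind
    refine ⟨k, by omega, h2, hpk, ?_⟩
    rw [pvMem_takeThru_desc _ _ _ _ _ rfl]
    exact ⟨by omega, by omega, fun m hm1 hm2 => h4 m (by omega) (by omega)⟩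

lemma pvAny_mem (N M : Int) (g : Int × Int → Bool) :
    (pvPairs N M).any g = true ↔ ∃ i j, (0 ≤ i ∧ i < N) ∧ (0 ≤ j ∧ j < M) ∧ g (i, j) = true := by
  simp only [pvPairs, List.any_eq_true, List.mem_flatMap, List.mem_map,
    PySem.List.mem_pyRange_one]
  constructor
  · rintro ⟨q, ⟨i, hi, j, hj, rfl⟩, hg⟩
    exact ⟨i, j, hi, hj, hg⟩
  · rintro ⟨i, j, hi, hj, hg⟩
    exact ⟨(i, j), ⟨i, hi, j, hj, rfl⟩, hg⟩

lemma pvAny_iff (Bs : List (List Char)) (N M r c : Int)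
    (hr0 : 0 ≤ r) (hrN : r < N) (hc0 : 0 ≤ c) (hcM : c < M) :
    pvAnyWrites Bs N M r c = true ↔
      ((pvGetc Bs r c = 'X' ∨ pvGetc Bs r c = '>' ∨ pvGetc Bs r c = '<' ∨ pvGetc Bs r c = '^' ∨ pvGetc Bs r c = 'v')
      ∨ ((PySem.List.pyRange (c-1) (-1) (-1)).map (fun k => pvGetc Bs r k)).find? (· != '.') = some '>'
      ∨ ((PySem.List.pyRange (c+1) M 1).map (fun k => pvGetc Bs r k)).find? (· != '.') = some '<'
      ∨ ((PySem.List.pyRange (r-1) (-1) (-1)).map (fun k => pvGetc Bs k c)).find? (· != '.') = some 'v'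
      ∨ ((PySem.List.pyRange (r+1) N 1).map (fun k => pvGetc Bs k c)).find? (· != '.') = some '^') := by
  rw [pvAnyWrites, pvAny_mem]
  constructor
  · rintro ⟨i, j, ⟨hi0, hiN⟩, ⟨hj0, hjM⟩, hw⟩
    simp only [pvWrites, Bool.or_eq_true, Bool.and_eq_true, beq_iff_eq,
      List.contains_iff_mem] at hw
    rcases hw with ((((⟨⟨rfl, rfl⟩, hs⟩ | ⟨⟨hg, rfl⟩, hmem⟩) | ⟨⟨hg, rfl⟩, hmem⟩) | ⟨⟨hg, rfl⟩, hmem⟩) | ⟨⟨hg, rfl⟩, hmem⟩)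
    · exact Or.inl (by tauto)
    · refine Or.inr (Or.inl ?_)
      exact (pvBridge_back (fun k => pvGetc Bs r k) M c '>' (by decide) hc0 hcM).mp
        ⟨j, hj0, hjM, hg, hmem⟩
    · refine Or.inr (Or.inr (Or.inl ?_))
      exact (pvBridge_fwd (fun k => pvGetc Bs r k) M c '<' (by decide) hc0).mp
        ⟨j, hj0, hjM, hg, hmem⟩
    · refine Or.inr (Or.inr (Or.inr (Or.inr ?_)))
      exact (pvBridge_fwd (fun k => pvGetc Bs k c) N r '^' (by decide) hr0).mp
        ⟨i, hi0, hiN, hg, hmem⟩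
    · refine Or.inr (Or.inr (Or.inr (Or.inl ?_)))
      exact (pvBridge_back (fun k => pvGetc Bs k c) N r 'v' (by decide) hr0 hrN).mp
        ⟨i, hi0, hiN, hg, hmem⟩
  · intro h
    rcases h with hs | hL | hR | hU | hD
    · refine ⟨r, c, ⟨hr0, hrN⟩, ⟨hc0, hcM⟩, ?_⟩
      simp only [pvWrites, Bool.or_eq_true, Bool.and_eq_true, beq_iff_eq]
      refine Or.inl (Or.inl (Or.inl (Or.inl ⟨⟨trivial, trivial⟩, ?_⟩)))
      tauto
    · obtain ⟨j, hj0, hjM, hg, hmem⟩ :=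
        (pvBridge_back (fun k => pvGetc Bs r k) M c '>' (by decide) hc0 hcM).mpr hL
      refine ⟨r, j, ⟨hr0, hrN⟩, ⟨hj0, hjM⟩, ?_⟩
      simp only [pvWrites, Bool.or_eq_true, Bool.and_eq_true, beq_iff_eq,
        List.contains_iff_mem]
      exact Or.inl (Or.inl (Or.inl (Or.inr ⟨⟨hg, trivial⟩, hmem⟩)))
    · obtain ⟨j, hj0, hjM, hg, hmem⟩ :=
        (pvBridge_fwd (fun k => pvGetc Bs r k) M c '<' (by decide) hc0).mpr hR
      refine ⟨r, j, ⟨hr0, hrN⟩, ⟨hj0, hjM⟩, ?_⟩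
      simp only [pvWrites, Bool.or_eq_true, Bool.and_eq_true, beq_iff_eq,
        List.contains_iff_mem]
      exact Or.inl (Or.inl (Or.inr ⟨⟨hg, trivial⟩, hmem⟩))
    · obtain ⟨i, hi0, hiN, hg, hmem⟩ :=
        (pvBridge_back (fun k => pvGetc Bs k c) N r 'v' (by decide) hr0 hrN).mpr hU
      refine ⟨i, c, ⟨hi0, hiN⟩, ⟨hc0, hcM⟩, ?_⟩
      simp only [pvWrites, Bool.or_eq_true, Bool.and_eq_true, beq_iff_eq,
        List.contains_iff_mem]
      exact Or.inr ⟨⟨hg, trivial⟩, hmem⟩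
    · obtain ⟨i, hi0, hiN, hg, hmem⟩ :=
        (pvBridge_fwd (fun k => pvGetc Bs k c) N r '^' (by decide) hr0).mpr hD
      refine ⟨i, c, ⟨hi0, hiN⟩, ⟨hc0, hcM⟩, ?_⟩
      simp only [pvWrites, Bool.or_eq_true, Bool.and_eq_true, beq_iff_eq,
        List.contains_iff_mem]
      exact Or.inl (Or.inr ⟨⟨hg, trivial⟩, hmem⟩)

lemma pvCell_eq (Bs : List (List Char)) (N M r c : Int)
    (hr0 : 0 ≤ r) (hrN : r < N) (hc0 : 0 ≤ c) (hcM : c < M) :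
    (if pvAnyWrites Bs N M r c then (1 : Int) else 0) = pvCellB Bs N M r c := by
  have hiff := pvAny_iff Bs N M r c hr0 hrN hc0 hcM
  by_cases hA : pvAnyWrites Bs N M r c = true
  · simp only [hA, if_true]
    have h := hiff.mp hA
    simp only [pvCellB]
    split_ifs with s1 s2 s3 s4 s5
    · rfl
    · rfl
    · rfl
    · rfl
    · rfl
    · exfalso; rcases h with h | h | h | h | h
      exacts [s1 h, s2 h, s3 h, s4 h, s5 h]
  · have hfalse : pvAnyWrites Bs N M r c = true → False := by
      intro hh; rw [hh] at hA; exact hA rfl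
    simp only [Bool.not_eq_true] at hA
    simp only [hA, Bool.false_eq_true, if_false]
    simp only [pvCellB]
    split_ifs with s1 s2 s3 s4 s5
    · exact absurd (hiff.mpr (Or.inl s1)) (fun hh => hfalse hh)
    · exact absurd (hiff.mpr (Or.inr (Or.inl s2))) (fun hh => hfalse hh)
    · exact absurd (hiff.mpr (Or.inr (Or.inr (Or.inl s3)))) (fun hh => hfalse hh)
    · exact absurd (hiff.mpr (Or.inr (Or.inr (Or.inr (Or.inl s4))))) (fun hh => hfalse hh)
    · exact absurd (hiff.mpr (Or.inr (Or.inr (Or.inr (Or.inr s5))))) (fun hh => hfalse hh)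
    · rfl

lemma pvPairs_bounds (N M : Int) : ∀ p ∈ pvPairs N M, 0 ≤ p.1 ∧ p.1 < N ∧ 0 ≤ p.2 ∧ p.2 < M := by
  intro p hp
  simp only [pvPairs, List.mem_flatMap, List.mem_map, PySem.List.mem_pyRange_one] at hp
  obtain ⟨i, hi, j, hj, rfl⟩ := hp
  exact ⟨hi.1, hi.2, hj.1, hj.2⟩

lemma pvMaze_eq (Bs : List (List Char)) (N M : Int) :
    (PySem.List.pyRange 0 N 1).foldl (fun mz i =>
        (PySem.List.pyRange 0 M 1).foldl (fun mz j => pvStepA Bs N M i j mz) mz)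
      ((PySem.List.pyRange 0 N 1).map (fun _ => (PySem.List.pyRange 0 M 1).map (fun _ => (0 : Int))))
    = (PySem.List.pyRange 0 N 1).map (fun i => (PySem.List.pyRange 0 M 1).map (fun j => pvCellB Bs N M i j)) := by
  have h1 : ∀ (mz : List (List Int)) (i : Int),
      (PySem.List.pyRange 0 M 1).foldl (fun mz j => pvStepA Bs N M i j mz) mz
        = ((PySem.List.pyRange 0 M 1).map (fun j => (i, j))).foldl
            (fun mz (p : Int × Int) => pvStepA Bs N M p.1 p.2 mz) mz := by
    intro mz i
    rw [List.foldl_map]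
  simp only [h1]
  rw [← pvFoldl_flatMap]
  have hbase : ((PySem.List.pyRange 0 N 1).map (fun _ => (PySem.List.pyRange 0 M 1).map (fun _ => (0 : Int))))
      = pvGridOf N M (fun _ _ => 0) := rfl
  rw [hbase]
  rw [show (PySem.List.pyRange 0 N 1).flatMap (fun i => (PySem.List.pyRange 0 M 1).map (fun j => (i, j)))
      = pvPairs N M from rfl]
  rw [pvFold_writes Bs (pvPairs N M) (pvPairs_bounds N M) (fun _ _ => 0)]
  have hgoal : (PySem.List.pyRange 0 N 1).map (fun i => (PySem.List.pyRange 0 M 1).map (fun j => pvCellB Bs N M i j))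
      = pvGridOf N M (fun i j => pvCellB Bs N M i j) := rfl
  rw [hgoal]
  apply pvGridOf_congr
  intro r c hr0 hrN hc0 hcM
  exact pvCell_eq Bs N M r c hr0 hrN hc0 hcM

lemma pvMain (B : List String) (N M : Int) : create_maze B N M = create_maze_alt B N M := by
  simp only [create_maze, create_maze_alt]
  rw [show (fun (st : List (List Int) × (Int × Int)) (i : Int) =>
        (PySem.List.pyRange 0 M 1).foldl (fun st j =>
          (pvStepA (B.map String.toList) N M i j st.1,
            if pvGetc (B.map String.toList) i j = 'A' then (i, j) else st.2)) st)
      = (fun (st : List (List Int) × (Int × Int)) (i : Int) =>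
        ((PySem.List.pyRange 0 M 1).foldl (fun mz j => pvStepA (B.map String.toList) N M i j mz) st.1,
         (PySem.List.pyRange 0 M 1).foldl (fun s j =>
            if pvGetc (B.map String.toList) i j = 'A' then (i, j) else s) st.2))
      from funext fun st => funext fun i =>
        pvFoldl_pair_split (fun mz j => pvStepA (B.map String.toList) N M i j mz)
          (fun s j => if pvGetc (B.map String.toList) i j = 'A' then (i, j) else s)
          (PySem.List.pyRange 0 M 1) st]
  rw [pvFoldl_pair_split
        (fun (a : List (List Int)) (i : Int) =>
          (PySem.List.pyRange 0 M 1).foldl (fun mz j => pvStepA (B.map String.toList) N M i j mz) a)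
        (fun (b : Int × Int) (i : Int) =>
          (PySem.List.pyRange 0 M 1).foldl (fun s j =>
            if pvGetc (B.map String.toList) i j = 'A' then (i, j) else s) b)
        (PySem.List.pyRange 0 N 1)
        ((PySem.List.pyRange 0 N 1).map (fun _ => (PySem.List.pyRange 0 M 1).map (fun _ => (0 : Int))),
          ((0 : Int), (0 : Int)))]
  rw [pvMaze_eq (B.map String.toList) N M]

-- ===== VERDICT (by name: the statement is the Claim_ definition above) =====
theorem create_maze_spec : Claim_equal_create_maze := by
  intro B N M _ _
  unfold Spec_create_maze
  exact pvMain B N M
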